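-- pv_equiv track=rewrite | github.com/dj-lumiere/problem-solving-boj | 백준/Silver/2503. 숫자 야구/숫자 야구.py | balls
-- ===== SOURCE A (Python) =====
-- from collections import deque, Counter
--
-- def strikes(a, b):
--     return sum(i == j for i, j in zip(str(a), str(b)))
--
-- def balls(a, b):
--     digit_count_a = Counter(str(a))
--     digit_count_b = Counter(str(b))
--     intersection = 0
--     for k, v in digit_count_a.items():
--         if k in digit_count_b:
--             intersection += min(v, digit_count_b[k])
--     return intersection - strikes(a, b)
-- ===== SOURCE B (Python) =====
-- from collections import Counter
--
-- def balls(a, b):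
--     # One pass over the zipped digits collects only the misplaced (non-strike)
--     # pairs; the trailing part of the longer string is kept whole; the answer
--     # is the min-overlap of the two reduced multisets (no strike subtraction).
--     sa, sb = str(a), str(b)
--     ra, rb = [], []
--     for x, y in zip(sa, sb):
--         if x != y:
--             ra.append(x)
--             rb.append(y)
--     m = min(len(sa), len(sb))
--     ra += sa[m:]
--     rb += sb[m:]
--     return sum((Counter(ra) & Counter(rb)).values())
-- ===== Notes on version B (the rewrite author's own statement) =====
-- stated objective: alternative
-- what changed: Instead of intersecting the full digit Counters and then subtracting the strike count, B filters the strike positions out in a single pass over the zipped strings and returns the min-overlap of the two reduced Counters directly, with no final subtraction.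
import Mathlib
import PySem

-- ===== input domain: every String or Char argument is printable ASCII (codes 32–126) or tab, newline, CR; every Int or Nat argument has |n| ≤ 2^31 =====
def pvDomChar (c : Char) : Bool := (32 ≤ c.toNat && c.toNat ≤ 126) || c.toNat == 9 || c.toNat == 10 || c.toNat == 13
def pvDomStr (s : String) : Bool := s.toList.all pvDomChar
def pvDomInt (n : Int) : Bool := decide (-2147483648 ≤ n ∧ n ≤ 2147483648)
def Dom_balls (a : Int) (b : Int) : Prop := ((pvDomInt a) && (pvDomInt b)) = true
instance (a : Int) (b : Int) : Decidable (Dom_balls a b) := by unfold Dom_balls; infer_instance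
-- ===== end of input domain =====

-- B filters the strike positions out of the zipped digit strings in one pass and
-- returns the min-overlap of the two reduced Counters directly, instead of A's
-- full-Counter intersection followed by subtracting the strike count (objective: alternative).

-- ===== PORT A =====
def strikesA (a : Int) (b : Int) : Int :=
  ((PySem.Int.toChars a).zip (PySem.Int.toChars b)).foldl
    (fun acc p => acc + (if p.1 = p.2 then 1 else 0)) 0

def balls (a : Int) (b : Int) : Int :=
  let digit_count_a := PySem.Dict.counter (PySem.Int.toChars a)
  let digit_count_b := PySem.Dict.counter (PySem.Int.toChars b)
  let intersection := digit_count_a.items.foldl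
    (fun acc kv =>
      if digit_count_b.contains kv.1 then acc + min kv.2 (digit_count_b.getD kv.1 0)
      else acc) 0
  intersection - strikesA a b

-- ===== PORT B =====
def balls_alt (a : Int) (b : Int) : Int :=
  let sa := PySem.Int.toChars a
  let sb := PySem.Int.toChars b
  let r := (sa.zip sb).foldl
    (fun acc p => if p.1 ≠ p.2 then (acc.1 ++ [p.1], acc.2 ++ [p.2]) else acc)
    (([] : List Char), ([] : List Char))
  let m : Int := min (sa.length : Int) (sb.length : Int)
  let ra := r.1 ++ PySem.List.slice sa (some m) none
  let rb := r.2 ++ PySem.List.slice sb (some m) none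
  let ca := PySem.Dict.counter ra
  let cb := PySem.Dict.counter rb
  -- sum((ca & cb).values()): Counter '&' takes the min per key of ca (zero mins contribute nothing to the sum)
  ca.items.foldl (fun acc kv => acc + min kv.2 (cb.getD kv.1 0)) 0

-- ===== PRECONDITION & SPEC =====
def Spec_balls (a : Int) (b : Int) (out : Int) : Prop := out = balls_alt a b
instance (a : Int) (b : Int) (out : Int) : Decidable (Spec_balls a b out) := by unfold Spec_balls; infer_instance

-- ===== CLAIM (what is proved, stated in full; the proofs are below) =====
def Claim_equal_balls : Prop := ∀ (a : Int) (b : Int), Dom_balls a b → Spec_balls a b (balls a b)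

-- ===== LEMMAS AND PROOFS =====

lemma zip_fst_decomp : ∀ (sa sb : List Char),
    ((sa.zip sb).map Prod.fst) ++ sa.drop (min sa.length sb.length) = sa
  | [], _ => by simp
  | _ :: _, [] => by simp
  | x :: xs, y :: ys => by
    simp only [List.zip_cons_cons, List.map_cons, List.length_cons, List.cons_append]
    rw [Nat.succ_min_succ, List.drop_succ_cons, zip_fst_decomp xs ys]

lemma zip_snd_decomp : ∀ (sa sb : List Char),
    ((sa.zip sb).map Prod.snd) ++ sb.drop (min sa.length sb.length) = sb
  | [], _ => by simp
  | _ :: _, [] => by simp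
  | x :: xs, y :: ys => by
    simp only [List.zip_cons_cons, List.map_cons, List.length_cons, List.cons_append]
    rw [Nat.succ_min_succ, List.drop_succ_cons, zip_snd_decomp xs ys]

-- count of a projected list splits along a Bool filter
lemma count_filter_split (l : List (Char × Char)) (q : Char × Char → Bool)
    (f : Char × Char → Char) (k : Char) :
    ((l.filter q).map f).count k + ((l.filter (fun x => !q x)).map f).count k
      = (l.map f).count k := by
  have hp := (List.filter_append_perm q l).map f
  rw [← hp.count_eq, List.map_append, List.count_append]

-- pointwise: min of the strike-reduced counts = min of the full counts minus k's strike count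
lemma point (sa sb : List Char) (k : Char) :
    min ((((((sa.zip sb).filter (fun p => !decide (p.1 = p.2))).map Prod.fst)
            ++ sa.drop (min sa.length sb.length)).count k : Int))
        ((((((sa.zip sb).filter (fun p => !decide (p.1 = p.2))).map Prod.snd)
            ++ sb.drop (min sa.length sb.length)).count k : Int))
      = min ((sa.count k : Int)) ((sb.count k : Int))
        - (((((sa.zip sb).filter (fun p => decide (p.1 = p.2))).map Prod.fst).count k : Int)) := by
  have h1 := count_filter_split (sa.zip sb) (fun p => decide (p.1 = p.2)) Prod.fst k
  have h2 := count_filter_split (sa.zip sb) (fun p => decide (p.1 = p.2)) Prod.snd k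
  have h3 : ((sa.zip sb).filter (fun p => decide (p.1 = p.2))).map Prod.snd
      = ((sa.zip sb).filter (fun p => decide (p.1 = p.2))).map Prod.fst := by
    apply List.map_congr_left
    intro x hx
    have := List.of_mem_filter hx
    simp only [decide_eq_true_eq] at this
    exact this.symm
  rw [h3] at h2
  have h4 : sa.count k
      = ((sa.zip sb).map Prod.fst).count k + (sa.drop (min sa.length sb.length)).count k := by
    conv_lhs => rw [← zip_fst_decomp sa sb]
    rw [List.count_append]
  have h5 : sb.count k
      = ((sa.zip sb).map Prod.snd).count k + (sb.drop (min sa.length sb.length)).count k := by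
    conv_lhs => rw [← zip_snd_decomp sa sb]
    rw [List.count_append]
  rw [List.count_append, List.count_append]
  push_cast
  omega

lemma setOfList_sum (xs : List Char) (f : Char → Int) :
    ((PySem.Set.ofList xs).map f).sum = ∑ k ∈ xs.toFinset, f k := by
  rw [← List.sum_toFinset f (PySem.Set.nodup_ofList xs)]
  congr 1
  ext c
  simp [PySem.Set.mem_ofList]

lemma sum_count_over (l : List Char) (U : Finset Char) (hsub : ∀ x ∈ l, x ∈ U) :
    ∑ k ∈ U, l.count k = l.length := by
  rw [← List.sum_toFinset_count_eq_length l]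
  exact (Finset.sum_subset (fun x hx => hsub x (List.mem_toFinset.mp hx))
    (fun k _ hk => List.count_eq_zero.mpr (fun h => hk (List.mem_toFinset.mpr h)))).symm

-- B's Counter-intersection sum, as a list sum over the distinct keys
lemma counter_inter_sum (xs ys : List Char) :
    (PySem.Dict.counter xs).items.foldl
      (fun acc kv => acc + min kv.2 ((PySem.Dict.counter ys).getD kv.1 0)) 0
    = ((PySem.Set.ofList xs).map
        (fun k => min ((xs.count k : Int)) ((ys.count k : Int)))).sum := by
  rw [PySem.Dict.items_counter, List.foldl_map]
  rw [PySem.List.foldl_add (g := fun k => min ((xs.count k : Int)) ((PySem.Dict.counter ys).getD k 0))]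
  simp only [PySem.Dict.getD_counter, zero_add]

-- A's guarded Counter-intersection loop computes the same sum (a missing key has count 0)
lemma A_inter_sum (xs ys : List Char) :
    (PySem.Dict.counter xs).items.foldl
      (fun acc kv =>
        if (PySem.Dict.counter ys).contains kv.1 then acc + min kv.2 ((PySem.Dict.counter ys).getD kv.1 0)
        else acc) 0
    = ((PySem.Set.ofList xs).map
        (fun k => min ((xs.count k : Int)) ((ys.count k : Int)))).sum := by
  rw [← counter_inter_sum xs ys]
  rw [PySem.Dict.items_counter, List.foldl_map, List.foldl_map]
  apply PySem.List.foldl_congr_mem'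
  intro k hk acc
  by_cases hc : (PySem.Dict.counter ys).contains k
  · simp [hc]
  · have hy : ys.count k = 0 := by
      rw [List.count_eq_zero]
      intro hmem
      exact hc (by simp [PySem.Dict.contains_counter, hmem])
    simp only [hc, PySem.Dict.getD_counter, hy]
    have : (0:Int) ≤ (xs.count k : Int) := by positivity
    omega

-- main list-level identity: full-intersection minus strikes = intersection of the reduced lists
lemma core (sa sb : List Char) :
    ((PySem.Set.ofList sa).map
        (fun k => min ((sa.count k : Int)) ((sb.count k : Int)))).sum
      - (sa.zip sb).foldl (fun acc p => acc + (if p.1 = p.2 then 1 else 0)) 0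
    = (let r := (sa.zip sb).foldl
          (fun acc p => if p.1 ≠ p.2 then (acc.1 ++ [p.1], acc.2 ++ [p.2]) else acc)
          (([] : List Char), ([] : List Char))
       let ra := r.1 ++ sa.drop (min sa.length sb.length)
       let rb := r.2 ++ sb.drop (min sa.length sb.length)
       ((PySem.Set.ofList ra).map
          (fun k => min ((ra.count k : Int)) ((rb.count k : Int)))).sum) := by
  have hfold : (sa.zip sb).foldl
      (fun acc p => if p.1 ≠ p.2 then (acc.1 ++ [p.1], acc.2 ++ [p.2]) else acc)
      (([] : List Char), ([] : List Char))
      = (((sa.zip sb).filter (fun p => !decide (p.1 = p.2))).map Prod.fst,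
         ((sa.zip sb).filter (fun p => !decide (p.1 = p.2))).map Prod.snd) := by
    rw [PySem.List.foldl_congr_mem (l := sa.zip sb)
      (f := fun acc (p : Char × Char) =>
        if p.1 ≠ p.2 then (acc.1 ++ [p.1], acc.2 ++ [p.2]) else acc)
      (g := fun acc (p : Char × Char) =>
        ((if p.1 ≠ p.2 then acc.1 ++ [p.1] else acc.1),
         (if p.1 ≠ p.2 then acc.2 ++ [p.2] else acc.2)))
      (init := (([] : List Char), ([] : List Char)))
      (by intro acc x _; by_cases h : x.1 = x.2 <;> simp [h])]
    rw [PySem.List.foldl_prod_mk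
      (f := fun l (p : Char × Char) => if p.1 ≠ p.2 then l ++ [p.1] else l)
      (g := fun l (p : Char × Char) => if p.1 ≠ p.2 then l ++ [p.2] else l)]
    rw [PySem.List.foldl_append_ite (p := fun p : Char × Char => p.1 ≠ p.2) (f := Prod.fst),
        PySem.List.foldl_append_ite (p := fun p : Char × Char => p.1 ≠ p.2) (f := Prod.snd)]
    simp [decide_not]
  simp only [hfold]
  rw [PySem.List.foldl_add (g := fun p : Char × Char => if p.1 = p.2 then (1:Int) else 0)]
  have hmap : (fun p : Char × Char => if p.1 = p.2 then (1:Int) else 0)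
      = fun p => if (fun q : Char × Char => decide (q.1 = q.2)) p = true then 1 else 0 := by
    funext p; by_cases h : p.1 = p.2 <;> simp [h]
  rw [hmap, PySem.List.sum_map_ite_one_zero]
  set m := min sa.length sb.length with hm
  set E := (sa.zip sb).filter (fun p => decide (p.1 = p.2)) with hE
  set N := (sa.zip sb).filter (fun p => !decide (p.1 = p.2)) with hN
  set ra := N.map Prod.fst ++ sa.drop m with hra
  set rb := N.map Prod.snd ++ sb.drop m with hrb
  set U := (sa ++ sb).toFinset with hU
  have hsaU : ∀ x ∈ sa, x ∈ U := by intro x hx; simp [hU, hx]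
  have hraU : ∀ x ∈ ra, x ∈ U := by
    intro x hx
    rcases List.mem_append.mp hx with h | h
    · obtain ⟨p, hp, rfl⟩ := List.mem_map.mp h
      exact hsaU _ ((List.of_mem_zip (List.mem_of_mem_filter hp)).1)
    · exact hsaU _ (List.mem_of_mem_drop h)
  have hEU : ∀ x ∈ E.map Prod.fst, x ∈ U := by
    intro x hx
    obtain ⟨p, hp, rfl⟩ := List.mem_map.mp hx
    exact hsaU _ ((List.of_mem_zip (List.mem_of_mem_filter hp)).1)
  rw [setOfList_sum, setOfList_sum]
  rw [Finset.sum_subset (f := fun k => min ((sa.count k : Int)) ((sb.count k : Int)))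
        (by intro x hx; exact hsaU x (List.mem_toFinset.mp hx) : sa.toFinset ⊆ U)
        (by intro k _ hk
            have h0 : sa.count k = 0 := List.count_eq_zero.mpr (fun h => hk (List.mem_toFinset.mpr h))
            simp only [h0, Nat.cast_zero]
            have h3 : (0:Int) ≤ (sb.count k : Int) := by positivity
            omega)]
  rw [Finset.sum_subset (f := fun k => min ((ra.count k : Int)) ((rb.count k : Int)))
        (by intro x hx; exact hraU x (List.mem_toFinset.mp hx) : ra.toFinset ⊆ U)
        (by intro k _ hk
            have h0 : ra.count k = 0 := List.count_eq_zero.mpr (fun h => hk (List.mem_toFinset.mpr h))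
            simp only [h0, Nat.cast_zero]
            have h3 : (0:Int) ≤ (rb.count k : Int) := by positivity
            omega)]
  have hstr : ((sa.zip sb).countP (fun p => decide (p.1 = p.2)) : Int)
      = ∑ k ∈ U, ((E.map Prod.fst).count k : Int) := by
    rw [← Nat.cast_sum]
    congr 1
    rw [sum_count_over (E.map Prod.fst) U hEU, List.length_map, hE,
        List.countP_eq_length_filter]
  rw [hstr, zero_add, ← Finset.sum_sub_distrib]
  apply Finset.sum_congr rfl
  intro k _
  exact (point sa sb k).symm

-- ===== VERDICT (by name: the statement is the Claim_ definition above) =====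
theorem balls_spec : Claim_equal_balls := by
  intro a b _
  show balls a b = balls_alt a b
  simp only [balls, balls_alt, strikesA]
  rw [A_inter_sum, counter_inter_sum]
  have hmin : (min (((PySem.Int.toChars a).length : Int)) (((PySem.Int.toChars b).length : Int)))
      = ((min (PySem.Int.toChars a).length (PySem.Int.toChars b).length : Nat) : Int) := by
    push_cast; rfl
  rw [hmin, PySem.List.slice_from_natCast, PySem.List.slice_from_natCast]
  simpa using core (PySem.Int.toChars a) (PySem.Int.toChars b)
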